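-- pv_equiv track=rewrite | github.com/biskvitka/Hack-Bulgaria | the-real-deal.py | zero_insert
-- ===== SOURCE A (Python) =====
-- def zero_insert(n):
--     a=[int(x) for x in str(n)]
--
--     for i in range(len(a)-1):
--
--         if a[i] == a[i + 1] or a[i] + a[i + 1] == 10:
--             a[i]=a[i]*10
--
--     n=0
--     for i in a:
--         n = n*(10**len(str(i))) + i
--
--     return n
-- ===== SOURCE B (Python) =====
-- def zero_insert(n):
--     # One fused numeric pass over the decimal digits: accumulate the result while
--     # looking at adjacent digit pairs (a marked pair gets an extra *10, i.e. an
--     # inserted 0), instead of A's mark-in-place pass plus arithmetic rebuild.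
--     # A marked 0 contributes no extra zero (0*10 == 0 in A), hence the d != 0 guard.
--     digits = [ord(c) - ord('0') for c in str(n)]
--     res = 0
--     for d, e in zip(digits, digits[1:]):
--         res = res * 10 + d
--         if d != 0 and (d == e or d + e == 10):
--             res = res * 10
--     return res * 10 + digits[-1]
-- ===== Notes on version B (the rewrite author's own statement) =====
-- stated objective: simpler
-- what changed: B makes one fused numeric pass over the digit pairs, accumulating the result directly (an extra *10 where a zero is inserted), instead of A's two passes: mark digits in place by *10 and then rebuild the number from per-element str-lengths.
import Mathlib
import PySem

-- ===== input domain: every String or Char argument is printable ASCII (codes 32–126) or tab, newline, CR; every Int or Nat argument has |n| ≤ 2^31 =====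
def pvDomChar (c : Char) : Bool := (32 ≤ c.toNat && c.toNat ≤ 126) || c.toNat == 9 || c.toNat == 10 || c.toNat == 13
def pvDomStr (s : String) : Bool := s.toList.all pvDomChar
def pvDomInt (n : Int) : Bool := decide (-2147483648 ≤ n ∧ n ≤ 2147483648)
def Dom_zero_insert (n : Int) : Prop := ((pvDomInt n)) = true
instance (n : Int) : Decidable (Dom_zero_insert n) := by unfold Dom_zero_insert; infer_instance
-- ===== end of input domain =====

-- B replaces A's two passes (mark matching digits in place by *10, then rebuild the number
-- from per-element str-lengths) by one fused numeric pass over adjacent digit pairs.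

-- ===== PORT A =====
def zero_insert (n : Int) : Int :=
  -- a = [int(x) for x in str(n)] ; int(x) = PySem.Int.ofChars? [c] (none = ValueError,
  -- reached only for n < 0 via the '-' char; those inputs are excluded by Pre_)
  let a : List Int := (PySem.Int.toStr n).toList.map (fun c => (PySem.Int.ofChars? [c]).getD 0)
  -- for i in range(len(a)-1): if a[i] == a[i+1] or a[i]+a[i+1] == 10: a[i] = a[i]*10
  let a := (PySem.List.pyRange 0 (PySem.List.len a - 1) 1).foldl (fun a i =>
    let x := PySem.List.pyGetD a i 0
    let y := PySem.List.pyGetD a (i + 1) 0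
    if x == y || x + y == 10 then PySem.List.pySetD a i (x * 10) else a) a
  -- n = 0 ; for i in a: n = n*(10**len(str(i))) + i   (len(str(i)) as .toList.length : Nat)
  a.foldl (fun n i => n * 10 ^ (PySem.Int.toStr i).toList.length + i) 0

-- ===== PORT B =====
def zero_insert_alt (n : Int) : Int :=
  -- digits = [ord(c) - ord('0') for c in str(n)]
  let digits : List Int := (PySem.Int.toStr n).toList.map
    (fun c => (c.toNat : Int) - ('0'.toNat : Int))
  -- for d, e in zip(digits, digits[1:]): res = res*10 + d ; if d != 0 and (d == e or d+e == 10): res = res*10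
  let res := (digits.zip (PySem.List.slice digits (some 1) none)).foldl (fun res p =>
    let res := res * 10 + p.1
    if p.1 != 0 && (p.1 == p.2 || p.1 + p.2 == 10) then res * 10 else res) 0
  -- return res*10 + digits[-1]   (digits is nonempty: str(n) is never empty)
  res * 10 + PySem.List.pyGetD digits (-1) 0

-- ===== PRECONDITION & SPEC =====
-- Pre_ excludes exactly n < 0, where Python A raises ValueError (int('-') on the sign char).
def Pre_zero_insert (n : Int) : Prop := 0 ≤ n
instance (n : Int) : Decidable (Pre_zero_insert n) := by unfold Pre_zero_insert; infer_instance
def pvWitness_zero_insert : Int := 5546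

def Spec_zero_insert (n : Int) (out : Int) : Prop := out = zero_insert_alt n
instance (n : Int) (out : Int) : Decidable (Spec_zero_insert n out) := by unfold Spec_zero_insert; infer_instance

-- ===== CLAIM (what is proved, stated in full; the proofs are below) =====
def Claim_equal_zero_insert : Prop := ∀ (n : Int), Dom_zero_insert n → Pre_zero_insert n → Spec_zero_insert n (zero_insert n)

-- ===== LEMMAS AND PROOFS =====

lemma pv_char_cases (c : Char) (h1 : 48 ≤ c.toNat) (h2 : c.toNat ≤ 57) :
    c = '0' ∨ c = '1' ∨ c = '2' ∨ c = '3' ∨ c = '4' ∨ c = '5' ∨ c = '6' ∨ c = '7' ∨ c = '8' ∨ c = '9' := by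
  have hc : c = Char.ofNat c.toNat := (Char.ofNat_toNat c).symm
  interval_cases h : c.toNat <;> simp_all

lemma pv_int_single (c : Char) (h1 : 48 ≤ c.toNat) (h2 : c.toNat ≤ 57) :
    (PySem.Int.ofChars? [c]).getD 0 = (c.toNat : Int) - 48 := by
  rcases pv_char_cases c h1 h2 with h|h|h|h|h|h|h|h|h|h <;> subst h <;> decide

lemma pv_len1 (x : Int) (h1 : 0 ≤ x) (h2 : x ≤ 9) : (PySem.Int.toChars x).length = 1 := by
  interval_cases x <;> decide

lemma pv_len2 (x : Int) (h1 : 1 ≤ x) (h2 : x ≤ 9) : (PySem.Int.toChars (x * 10)).length = 2 := by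
  interval_cases x <;> decide

lemma pv_toDigitsCore_mem (f : Nat) : ∀ (m : Nat) (acc : List Char) (c : Char),
    c ∈ Nat.toDigitsCore 10 f m acc → (48 ≤ c.toNat ∧ c.toNat ≤ 57) ∨ c ∈ acc := by
  induction f with
  | zero => intro m acc c h; right; simpa [Nat.toDigitsCore] using h
  | succ f ih =>
    intro m acc c h
    have hd : ∀ k : Nat, k < 10 → 48 ≤ (Nat.digitChar k).toNat ∧ (Nat.digitChar k).toNat ≤ 57 := by
      intro k hk; interval_cases k <;> decide
    simp only [Nat.toDigitsCore] at h
    by_cases hz : m / 10 = 0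
    · simp only [hz, if_true] at h
      rcases List.mem_cons.1 h with h | h
      · subst h; exact Or.inl (hd _ (Nat.mod_lt _ (by omega)))
      · exact Or.inr h
    · simp only [hz, if_false] at h
      rcases ih (m / 10) _ c h with h | h
      · exact Or.inl h
      · rcases List.mem_cons.1 h with h | h
        · subst h; exact Or.inl (hd _ (Nat.mod_lt _ (by omega)))
        · exact Or.inr h

lemma pv_toDigitsCore_len (f : Nat) : ∀ (m : Nat) (acc : List Char),
    acc.length + 1 ≤ (Nat.toDigitsCore 10 (f + 1) m acc).length := by
  induction f with
  | zero =>
    intro m acc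
    simp only [Nat.toDigitsCore]
    split <;> simp
  | succ f ih =>
    intro m acc
    simp only [Nat.toDigitsCore]
    split
    · simp
    · exact le_trans (by simp) (ih (m / 10) (Nat.digitChar (m % 10) :: acc))

lemma pv_toChars_digits (n : Int) (hn : 0 ≤ n) :
    ∀ c ∈ PySem.Int.toChars n, 48 ≤ c.toNat ∧ c.toNat ≤ 57 := by
  intro c hc
  simp only [PySem.Int.toChars, if_neg (by omega : ¬ n < 0)] at hc
  rcases pv_toDigitsCore_mem _ _ _ _ hc with h | h
  · exact h
  · simp at h

lemma pv_toChars_ne_nil (n : Int) (hn : 0 ≤ n) : PySem.Int.toChars n ≠ [] := by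
  simp only [PySem.Int.toChars, if_neg (by omega : ¬ n < 0)]
  have := pv_toDigitsCore_len n.toNat n.toNat []
  intro h
  rw [Nat.toDigits] at h
  simp [h] at this



def pvMark : List Int → List Int
  | [] => []
  | [x] => [x]
  | x :: y :: t => (if x == y || x + y == 10 then x * 10 else x) :: pvMark (y :: t)

lemma pv_shift (k : Nat) : ∀ (a b : Int), 0 ≤ a → b - a = (k : Int) → ∀ (x : Int) (t : List Int),
    (PySem.List.pyRange (a + 1) (b + 1) 1).foldl (fun l i =>
      let u := PySem.List.pyGetD l i 0
      let v := PySem.List.pyGetD l (i + 1) 0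
      if u == v || u + v == 10 then PySem.List.pySetD l i (u * 10) else l) (x :: t)
    = x :: (PySem.List.pyRange a b 1).foldl (fun l i =>
      let u := PySem.List.pyGetD l i 0
      let v := PySem.List.pyGetD l (i + 1) 0
      if u == v || u + v == 10 then PySem.List.pySetD l i (u * 10) else l) t := by
  induction k with
  | zero =>
    intro a b ha hab x t
    rw [PySem.List.pyRange_one_eq_nil (by omega), PySem.List.pyRange_one_eq_nil (by omega)]
    rfl
  | succ k ih =>
    intro a b ha hab x t
    rw [PySem.List.pyRange_one_cons (by omega), PySem.List.pyRange_one_cons (by omega : a < b)]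
    simp only [List.foldl_cons]
    have hg1 : PySem.List.pyGetD (x :: t) (a + 1) 0 = PySem.List.pyGetD t a 0 := by
      have h1 : a + 1 = ((a.toNat + 1 : Nat) : Int) := by omega
      have h2 : a = ((a.toNat : Nat) : Int) := by omega
      rw [h1, PySem.List.pyGetD_natCast, h2, PySem.List.pyGetD_natCast]
      simp [show max a 0 = a from by omega]
    have hg2 : PySem.List.pyGetD (x :: t) (a + 1 + 1) 0 = PySem.List.pyGetD t (a + 1) 0 := by
      have h1 : a + 1 + 1 = ((a.toNat + 2 : Nat) : Int) := by omega
      have h2 : a + 1 = ((a.toNat + 1 : Nat) : Int) := by omega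
      rw [h1, PySem.List.pyGetD_natCast, h2, PySem.List.pyGetD_natCast]
      simp
    have hs : ∀ v : Int, PySem.List.pySetD (x :: t) (a + 1) v = x :: PySem.List.pySetD t a v := by
      intro v
      have h1 : a + 1 = ((a.toNat + 1 : Nat) : Int) := by omega
      have h2 : a = ((a.toNat : Nat) : Int) := by omega
      rw [h1, PySem.List.pySetD_natCast, h2, PySem.List.pySetD_natCast]
      simp [show max a 0 = a from by omega]
    simp only [hg1, hg2, hs]
    by_cases hc : (PySem.List.pyGetD t a 0 == PySem.List.pyGetD t (a + 1) 0
        || PySem.List.pyGetD t a 0 + PySem.List.pyGetD t (a + 1) 0 == 10) = true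
    · simp only [hc, if_true]
      have := ih (a + 1) b (by omega) (by omega) x (PySem.List.pySetD t a (PySem.List.pyGetD t a 0 * 10))
      simpa using this
    · simp only [if_neg hc]
      have := ih (a + 1) b (by omega) (by omega) x t
      simpa using this

lemma pv_loop1 (vs : List Int) :
    (PySem.List.pyRange 0 (PySem.List.len vs - 1) 1).foldl (fun l i =>
      let u := PySem.List.pyGetD l i 0
      let v := PySem.List.pyGetD l (i + 1) 0
      if u == v || u + v == 10 then PySem.List.pySetD l i (u * 10) else l) vs = pvMark vs := by
  induction vs using pvMark.induct with
  | case1 => rw [PySem.List.pyRange_one_eq_nil (by simp [PySem.List.len])]; rfl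
  | case2 x => rw [PySem.List.pyRange_one_eq_nil (by simp [PySem.List.len])]; rfl
  | case3 x y t ih =>
    have hlen : PySem.List.len (x :: y :: t) - 1 = (t.length : Int) + 1 := by
      simp [PySem.List.len_eq]
    rw [hlen, PySem.List.pyRange_one_cons (by omega)]
    simp only [List.foldl_cons]
    have hg0 : PySem.List.pyGetD (x :: y :: t) 0 0 = x := PySem.List.pyGetD_zero_cons _ _ _
    have hg1 : PySem.List.pyGetD (x :: y :: t) (0 + 1) 0 = y := by
      have h1 : (0 : Int) + 1 = ((1 : Nat) : Int) := by omega
      rw [h1, PySem.List.pyGetD_natCast]; rfl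
    have hs : ∀ v : Int, PySem.List.pySetD (x :: y :: t) 0 v = v :: y :: t := by
      intro v
      have h0 : (0 : Int) = ((0 : Nat) : Int) := rfl
      rw [h0, PySem.List.pySetD_natCast]; rfl
    simp only [hg0, hg1, hs]
    by_cases hc : (x == y || x + y == 10) = true
    · rw [if_pos hc]
      rw [pv_shift t.length 0 (t.length : Int) (by omega) (by omega) (x * 10) (y :: t)]
      have hl2 : (t.length : Int) = PySem.List.len (y :: t) - 1 := by simp [PySem.List.len_eq]
      rw [hl2, ih]
      simp [pvMark, hc]
    · rw [if_neg hc]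
      rw [pv_shift t.length 0 (t.length : Int) (by omega) (by omega) x (y :: t)]
      have hl2 : (t.length : Int) = PySem.List.len (y :: t) - 1 := by simp [PySem.List.len_eq]
      rw [hl2, ih]
      simp [pvMark, hc]

lemma pv_main (vs : List Int) (hne : vs ≠ []) (hd : ∀ u ∈ vs, 0 ≤ u ∧ u ≤ 9) : ∀ (r : Int),
    (pvMark vs).foldl (fun n i => n * 10 ^ (PySem.Int.toStr i).toList.length + i) r
    = (vs.zip vs.tail).foldl (fun res p =>
        let res := res * 10 + p.1
        if p.1 != 0 && (p.1 == p.2 || p.1 + p.2 == 10) then res * 10 else res) r * 10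
      + vs.getLast hne := by
  induction vs using pvMark.induct with
  | case1 => exact absurd rfl hne
  | case2 x =>
    intro r
    obtain ⟨hx0, hx9⟩ := hd x (by simp)
    simp only [pvMark, List.foldl_cons, List.foldl_nil, List.zip_nil_right, List.getLast_singleton,
      List.tail_cons, PySem.Int.toList_toStr, pv_len1 x hx0 hx9]
    ring
  | case3 x y t ih =>
    intro r
    obtain ⟨hx0, hx9⟩ := hd x (by simp)
    have hy := hd y (by simp)
    have hstep : (if x == y || x + y == 10 then x * 10 else x) :: pvMark (y :: t) = pvMark (x :: y :: t) := rfl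
    simp only [pvMark, List.foldl_cons, List.tail_cons]
    have hzip : (x :: y :: t).zip (y :: t) = (x, y) :: (y :: t).zip t := rfl
    rw [hzip]
    simp only [List.foldl_cons]
    have hlast : (x :: y :: t).getLast hne = (y :: t).getLast (by simp) := by
      simp [List.getLast_cons]
    rw [hlast]
    have htail : (y :: t).tail = t := rfl
    have := ih (by simp) (fun u hu => hd u (List.mem_cons_of_mem x hu))
    rw [htail] at this
    rw [← this]
    -- it remains to match the first step's accumulators
    congr 1
    by_cases hc : (x == y || x + y == 10) = true
    · rw [if_pos hc]
      by_cases hx : x = 0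
      · subst hx
        have : y = 0 := by
          rcases Bool.or_eq_true_iff.1 hc with h | h
          · exact (beq_iff_eq.1 h).symm
          · have := beq_iff_eq.1 h; omega
        subst this
        simp [PySem.Int.toList_toStr]
        exact Or.inl (by decide)
      · have hx1 : 1 ≤ x := by omega
        rw [if_pos (by simp [hc, hx])]
        simp only [PySem.Int.toList_toStr, pv_len2 x hx1 hx9]
        ring
    · rw [if_neg hc, if_neg (by simp [hc])]
      simp only [PySem.Int.toList_toStr, pv_len1 x hx0 hx9]
      ring


-- ===== VERDICT (by name: the statement is the Claim_ definition above) =====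
theorem zero_insert_spec : Claim_equal_zero_insert := by
  intro n hdom hpre
  show zero_insert n = zero_insert_alt n
  have hds := PySem.Int.toList_toStr n
  have hdig : ∀ c ∈ (PySem.Int.toStr n).toList, 48 ≤ c.toNat ∧ c.toNat ≤ 57 := by
    rw [hds]; exact pv_toChars_digits n hpre
  have hmap : (PySem.Int.toStr n).toList.map (fun c => (PySem.Int.ofChars? [c]).getD 0)
      = (PySem.Int.toStr n).toList.map (fun c => (c.toNat : Int) - ('0'.toNat : Int)) := by
    apply List.map_congr_left
    intro c hc
    have h := hdig c hc
    rw [pv_int_single c h.1 h.2, show ('0'.toNat : Int) = 48 from rfl]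
  have hvne : (PySem.Int.toStr n).toList.map (fun c => (c.toNat : Int) - ('0'.toNat : Int)) ≠ [] := by
    simp only [ne_eq, List.map_eq_nil_iff]
    rw [hds]; exact pv_toChars_ne_nil n hpre
  have hvs : ∀ u ∈ (PySem.Int.toStr n).toList.map (fun c => (c.toNat : Int) - ('0'.toNat : Int)),
      0 ≤ u ∧ u ≤ 9 := by
    intro u hu
    rcases List.mem_map.1 hu with ⟨c, hc, rfl⟩
    have h := hdig c hc
    have h0 : '0'.toNat = 48 := rfl
    rw [h0]
    constructor <;> omega
  simp only [zero_insert, zero_insert_alt, hmap]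
  rw [pv_loop1, pv_main _ hvne hvs 0, PySem.List.slice_from_one,
    PySem.List.pyGetD_neg_one _ _ hvne]
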